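-- pv_equiv track=rewrite | github.com/leskin-in/mipt-bioalgo | hw4/_sequence_peptide_convolution.py | _cyclospectrum_score
-- ===== SOURCE A (Python) =====
-- def _cyclospectrum_score(peptide: tuple, spectrum: dict) -> int:
--     """
--     Calculate the cyclospectrum score for the given peptide
--     """
--     cyclospectrum = {}
--     for cycle_len in range(1, len(peptide)):
--         peptide_extended = peptide + peptide[:(cycle_len - 1)]
--         for cycle_start_pos in range(len(peptide)):
--             current_mass = _peptide_mass(peptide_extended[cycle_start_pos:(cycle_start_pos + cycle_len)])
--             cyclospectrum[current_mass] = cyclospectrum.get(current_mass, 0) + 1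
--
--     current_mass = _peptide_mass(peptide)
--     cyclospectrum[current_mass] = cyclospectrum.get(current_mass, 0) + 1
--
--     result = 0
--     for mass in cyclospectrum.keys():
--         result += spectrum.get(mass, 0)  # spectrum.get(mass, 0) * cyclospectrum[mass]
--     return result
--
-- def _peptide_mass(peptide: tuple):
--     """
--     Calculate peptide mass
--     """
--     return sum(peptide)
-- ===== SOURCE B (Python) =====
-- def _cyclospectrum_score(peptide: tuple, spectrum: dict) -> int:
--     """
--     Cyclospectrum score via prefix sums over the doubled peptide:
--     each cyclic subpeptide mass in O(1), distinct masses kept in a set.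
--     """
--     n = len(peptide)
--     prefix = [0]
--     total = 0
--     for mass in peptide + peptide:
--         total += mass
--         prefix.append(total)
--     masses = set()
--     for length in range(1, n):
--         for start in range(n):
--             masses.add(prefix[start + length] - prefix[start])
--     masses.add(prefix[n])
--     score = 0
--     for mass in masses:
--         score += spectrum.get(mass, 0)
--     return score
-- ===== Notes on version B (the rewrite author's own statement) =====
-- stated objective: faster
-- what changed: B replaces A's per-subpeptide slice-and-sum (O(n) each, O(n^3) total) by a prefix-sum array over the doubled peptide giving each cyclic subpeptide mass in O(1), and collects the distinct masses in a set instead of a count dict.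
import Mathlib
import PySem

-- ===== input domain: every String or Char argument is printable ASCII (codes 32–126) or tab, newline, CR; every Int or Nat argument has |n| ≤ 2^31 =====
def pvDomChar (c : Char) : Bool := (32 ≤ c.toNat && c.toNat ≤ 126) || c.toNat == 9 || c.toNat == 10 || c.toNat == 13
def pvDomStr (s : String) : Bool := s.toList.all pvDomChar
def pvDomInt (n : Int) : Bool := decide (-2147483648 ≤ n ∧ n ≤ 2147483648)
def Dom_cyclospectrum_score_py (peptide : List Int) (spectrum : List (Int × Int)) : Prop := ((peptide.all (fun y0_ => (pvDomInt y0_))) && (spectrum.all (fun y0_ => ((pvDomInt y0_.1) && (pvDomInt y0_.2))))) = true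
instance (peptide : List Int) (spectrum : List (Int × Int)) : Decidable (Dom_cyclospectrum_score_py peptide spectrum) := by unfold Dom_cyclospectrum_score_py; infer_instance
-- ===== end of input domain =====

-- B scores by collecting cyclic-subpeptide masses via prefix sums over the doubled peptide
-- (O(n^2) distinct-mass collection instead of A's O(n^3) slice-and-sum per subpeptide).


-- ===== PORT A =====
-- port of _peptide_mass
def peptide_mass_py (peptide : List Int) : Int := peptide.sum

def cyclospectrum_score_py (peptide : List Int) (spectrum : List (Int × Int)) : Int :=
  let cyclo : PySem.Dict Int Int :=
    (PySem.List.pyRange 1 (PySem.List.len peptide) 1).foldl (fun d cycle_len =>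
      let peptide_extended := peptide ++ PySem.List.slice peptide none (some (cycle_len - 1))
      (PySem.List.pyRange 0 (PySem.List.len peptide) 1).foldl (fun d cycle_start_pos =>
        let current_mass := peptide_mass_py
          (PySem.List.slice peptide_extended (some cycle_start_pos) (some (cycle_start_pos + cycle_len)))
        d.insert current_mass (d.getD current_mass 0 + 1)) d)
      (PySem.Dict.mk [])
  let current_mass := peptide_mass_py peptide
  let cyclo2 := cyclo.insert current_mass (cyclo.getD current_mass 0 + 1)
  cyclo2.keys.foldl (fun result mass => result + (PySem.Dict.mk spectrum).getD mass 0) 0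

-- ===== PORT B =====
def cyclospectrum_score_py_alt (peptide : List Int) (spectrum : List (Int × Int)) : Int :=
  let n := PySem.List.len peptide
  let pt := (peptide ++ peptide).foldl
    (fun (acc : List Int × Int) mass => (acc.1 ++ [acc.2 + mass], acc.2 + mass)) ([0], 0)
  let pref := pt.1
  let masses : PySem.Set Int :=
    (PySem.List.pyRange 1 n 1).foldl (fun s length =>
      (PySem.List.pyRange 0 n 1).foldl (fun s start =>
        PySem.Set.add s (PySem.List.pyGetD pref (start + length) 0 - PySem.List.pyGetD pref start 0)) s)
      PySem.Set.empty
  let masses2 := PySem.Set.add masses (PySem.List.pyGetD pref n 0)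
  masses2.foldl (fun score mass => score + (PySem.Dict.mk spectrum).getD mass 0) 0

-- ===== PRECONDITION & SPEC =====
def Spec_cyclospectrum_score_py (peptide : List Int) (spectrum : List (Int × Int)) (out : Int) : Prop := out = cyclospectrum_score_py_alt peptide spectrum
instance (peptide : List Int) (spectrum : List (Int × Int)) (out : Int) : Decidable (Spec_cyclospectrum_score_py peptide spectrum out) := by unfold Spec_cyclospectrum_score_py; infer_instance

-- ===== CLAIM (what is proved, stated in full; the proofs are below) =====
def Claim_equal_cyclospectrum_score_py : Prop := ∀ (peptide : List Int) (spectrum : List (Int × Int)), Dom_cyclospectrum_score_py peptide spectrum → Spec_cyclospectrum_score_py peptide spectrum (cyclospectrum_score_py peptide spectrum)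

-- ===== LEMMAS AND PROOFS =====

-- the shorthand for the prefix-sum list B builds
def pvPrefList (p : List Int) : List Int :=
  (0:Int) :: (List.range (p ++ p).length).map (fun i => ((p ++ p).take (i+1)).sum)

-- the B-side prefix-sum loop, characterised
theorem pvFold_spec (xs : List Int) (l : List Int) (t : Int) :
    xs.foldl (fun (acc : List Int × Int) m => (acc.1 ++ [acc.2 + m], acc.2 + m)) (l, t)
      = (l ++ (List.range xs.length).map (fun i => t + (xs.take (i+1)).sum), t + xs.sum) := by
  induction xs generalizing l t with
  | nil => simp
  | cons x rest ih =>
    simp only [List.foldl_cons]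
    rw [ih]
    simp [List.range_succ_eq_map, List.map_map, Function.comp, add_assoc]

theorem pvPref_spec (xs : List Int) :
    (xs.foldl (fun (acc : List Int × Int) m => (acc.1 ++ [acc.2 + m], acc.2 + m)) ([0], 0)).1
      = (0:Int) :: (List.range xs.length).map (fun i => (xs.take (i+1)).sum) := by
  rw [pvFold_spec]; simp

theorem pvPref_getD (p : List Int) (j : Nat) (hj : j ≤ (p ++ p).length) :
    (pvPrefList p).getD j 0 = ((p ++ p).take j).sum := by
  unfold pvPrefList
  cases j with
  | zero => simp
  | succ j =>
    have hj' : j < p.length + p.length := by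
      rw [List.length_append] at hj; omega
    simp [List.getD, hj']

-- dropping b then taking a from A's extended peptide agrees with the doubled peptide
theorem pvPref_spec' (p : List Int) :
    ((p ++ p).foldl (fun (acc : List Int × Int) m => (acc.1 ++ [acc.2 + m], acc.2 + m)) ([0], 0)).1
      = pvPrefList p :=
  pvPref_spec (p ++ p)

theorem pvExt_window (p : List Int) (a b : Nat) (ha1 : 1 ≤ a) (ha : a < p.length) (hb : b < p.length) :
    ((p ++ p.take (a-1)).drop b).take a = ((p ++ p).drop b).take a := by
  have hlen : (p ++ p.take (a-1)).length = p.length + (a-1) := by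
    rw [List.length_append, List.length_take]; omega
  have hsplit : p ++ p = (p ++ p.take (a-1)) ++ p.drop (a-1) := by
    rw [List.append_assoc, List.take_append_drop]
  have h1 : b ≤ (p ++ p.take (a-1)).length := by omega
  have h2 : a ≤ ((p ++ p.take (a-1)).drop b).length := by rw [List.length_drop, hlen]; omega
  conv_rhs => rw [hsplit, List.drop_append_of_le_length h1, List.take_append_of_le_length h2]

-- one cyclic-subpeptide mass: A's slice-and-sum equals B's prefix-sum difference
theorem pvMass_eq (p : List Int) (L s : Int) (hL1 : 1 ≤ L) (hLn : L < (p.length : Int))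
    (hs0 : 0 ≤ s) (hsn : s < (p.length : Int)) :
    (PySem.List.slice (p ++ PySem.List.slice p none (some (L - 1))) (some s) (some (s + L))).sum
      = PySem.List.pyGetD (pvPrefList p) (s + L) 0 - PySem.List.pyGetD (pvPrefList p) s 0 := by
  obtain ⟨a, rfl⟩ : ∃ a : Nat, L = (a : Int) := ⟨L.toNat, (Int.toNat_of_nonneg (by omega)).symm⟩
  obtain ⟨b, rfl⟩ : ∃ b : Nat, s = (b : Int) := ⟨s.toNat, (Int.toNat_of_nonneg hs0).symm⟩
  have ha1 : 1 ≤ a := by omega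
  have ha : a < p.length := by omega
  have hb : b < p.length := by omega
  have hcast1 : (a : Int) - 1 = ((a - 1 : Nat) : Int) := by omega
  have hcast2 : (b : Int) + (a : Int) = ((b + a : Nat) : Int) := by push_cast; ring
  rw [hcast1, PySem.List.slice_to_natCast, hcast2, PySem.List.slice_natCast,
      PySem.List.pyGetD_natCast, PySem.List.pyGetD_natCast]
  have hba : b + a - b = a := by omega
  rw [hba, pvPref_getD p (b + a) (by rw [List.length_append]; omega),
      pvPref_getD p b (by rw [List.length_append]; omega),
      pvExt_window p a b ha1 ha hb]
  rw [List.take_add, List.sum_append]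
  ring

-- keys of a nested insert loop
theorem pvKeys_foldl_outer (ls : List Int) (F : PySem.Dict Int Int → Int → PySem.Dict Int Int)
    (g : Int → List Int) (h : ∀ d L, (F d L).keys = PySem.Set.update d.keys (g L))
    (d : PySem.Dict Int Int) :
    (ls.foldl F d).keys = ls.foldl (fun s L => PySem.Set.update s (g L)) d.keys := by
  induction ls generalizing d with
  | nil => rfl
  | cons L ls ih => simp only [List.foldl_cons]; rw [ih, h]

-- the final insert of the full-peptide mass, on the keys / set level
theorem pvFinal (d : PySem.Dict Int Int) (S : List Int) (h : d.keys = S) (M : Int) :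
    (d.insert M (d.getD M 0 + 1)).keys = PySem.Set.add S M := by
  by_cases hmem : M ∈ d.keys
  · rw [PySem.Dict.keys_insert_of_contains d _ ((PySem.Dict.contains_iff_mem_keys d M).mpr hmem),
        h, PySem.Set.add_of_mem (h ▸ hmem)]
  · have hc : d.contains M = false := by
      cases hcc : d.contains M with
      | false => rfl
      | true => exact absurd ((PySem.Dict.contains_iff_mem_keys d M).mp hcc) hmem
    rw [PySem.Dict.keys_insert_of_not_contains d _ hc, h, PySem.Set.add_of_not_mem (h ▸ hmem)]

-- ===== VERDICT (by name: the statement is the Claim_ definition above) =====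
theorem cyclospectrum_score_py_spec : Claim_equal_cyclospectrum_score_py := by
  intro p sp _
  unfold Spec_cyclospectrum_score_py cyclospectrum_score_py cyclospectrum_score_py_alt peptide_mass_py
  simp only [PySem.List.len_eq, pvPref_spec']
  -- A's dict keys are the same list as B's set of masses
  have hkeys :
      ((PySem.List.pyRange 1 (p.length : Int) 1).foldl (fun d cycle_len =>
          (PySem.List.pyRange 0 (p.length : Int) 1).foldl (fun d cycle_start_pos =>
            let m := (PySem.List.slice (p ++ PySem.List.slice p none (some (cycle_len - 1)))
              (some cycle_start_pos) (some (cycle_start_pos + cycle_len))).sum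
            d.insert m (d.getD m 0 + 1)) d) (PySem.Dict.mk ([] : List (Int × Int)))).keys
        = (PySem.List.pyRange 1 (p.length : Int) 1).foldl (fun s length =>
            (PySem.List.pyRange 0 (p.length : Int) 1).foldl (fun s start =>
              PySem.Set.add s (PySem.List.pyGetD (pvPrefList p) (start + length) 0
                - PySem.List.pyGetD (pvPrefList p) start 0)) s) PySem.Set.empty := by
    rw [pvKeys_foldl_outer _ _
      (fun L => (PySem.List.pyRange 0 (p.length : Int) 1).map (fun s =>
        (PySem.List.slice (p ++ PySem.List.slice p none (some (L - 1))) (some s) (some (s + L))).sum))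
      (fun d L => PySem.Dict.keys_foldl_insert_key _ _ _ _)]
    apply PySem.List.foldl_congr_mem
    intro acc L hL
    rw [← PySem.Set.update_map_eq_foldl_add]
    congr 1
    apply List.map_congr_left
    intro s hs
    rw [PySem.List.mem_pyRange_one] at hL hs
    exact pvMass_eq p L s hL.1 hL.2 hs.1 hs.2
  have hfull : PySem.List.pyGetD (pvPrefList p) ((p.length : Int)) 0 = p.sum := by
    rw [PySem.List.pyGetD_natCast, pvPref_getD p p.length (by rw [List.length_append]; omega),
        List.take_append_of_le_length (le_refl _), List.take_length]
  rw [hfull, pvFinal _ _ hkeys p.sum]
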